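-- pv_equiv track=rewrite | github.com/derekli-NJ/15-112-Coursework | week2/hw2.py | nthHappyPrime
-- ===== SOURCE A (Python) =====
-- def numberLength(x):
--     n = 0
--     while x>0:
--         x=(x//10)
--         n+=1
--     return n
--
-- def isPrime(n):
--     if (n < 2):
--         return False
--     for factor in range(2,n):
--         if (n % factor == 0):
--             return False
--     return True
--
-- def sumOfSquaresOfDigits(x):
--     xLength = numberLength(x)
--     sum = 0
--     for counter in range(xLength):
--         digit = (x//(10**counter))%10
--         sum+=digit**2
--     return sum
--
-- def isHappyNumber(x):
--     if x<1:
--         return False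
--     else:
--         while (0<1):
--             num = sumOfSquaresOfDigits(x)
--             x=num
--             if x==1:
--                 return True
--             elif x==4:
--                 return False
--
-- def nthHappyPrime(n):
--     found = 0
--     guess = 0
--     while (found<=n):
--         guess+=1
--         if (isPrime(guess) and isHappyNumber(guess)):
--             found+=1
--     return guess
-- ===== SOURCE B (Python) =====
-- def nthHappyPrime(n):
--     def is_prime(m):
--         if m < 2:
--             return False
--         i = 2
--         while i * i <= m:
--             if m % i == 0:
--                 return False
--             i += 1
--         return True
--
--     def digit_square_sum(m):
--         s = 0
--         while m > 0:
--             s += (m % 10) * (m % 10)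
--             m //= 10
--         return s
--
--     def is_happy(m):
--         if m < 1:
--             return False
--         while True:
--             m = digit_square_sum(m)
--             if m == 1:
--                 return True
--             if m == 4:
--                 return False
--
--     guess = 0
--     remaining = n
--     while remaining >= 0:
--         guess += 1
--         if is_prime(guess) and is_happy(guess):
--             remaining -= 1
--     return guess
-- ===== Notes on version B (the rewrite author's own statement) =====
-- stated objective: faster
-- what changed: primality is tested by trial division only up to the square root (i*i <= m) instead of over all of range(2,n), and the digit-square sum is computed in one pass by repeated last-digit extraction instead of first measuring the number's length and then dividing by growing powers of ten
import Mathlib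
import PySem

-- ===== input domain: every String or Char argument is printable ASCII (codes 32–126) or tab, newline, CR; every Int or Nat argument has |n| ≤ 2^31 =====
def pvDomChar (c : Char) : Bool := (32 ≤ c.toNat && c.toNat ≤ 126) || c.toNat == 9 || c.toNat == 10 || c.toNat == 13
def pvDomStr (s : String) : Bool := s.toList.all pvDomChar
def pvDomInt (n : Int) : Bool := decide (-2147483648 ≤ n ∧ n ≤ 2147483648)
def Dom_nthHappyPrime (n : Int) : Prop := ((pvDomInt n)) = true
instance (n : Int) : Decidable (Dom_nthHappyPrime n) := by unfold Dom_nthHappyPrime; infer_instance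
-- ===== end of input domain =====

-- B replaces A's full-range trial division by trial division up to the square root and A's
-- length-and-powers-of-ten digit-square sum by a one-pass last-digit extraction (objective: faster).
-- Both Pythons' unbounded 'while' loops are ported with a fuel guard that merely makes them total.

-- fuel guards (totality only; both ports exhaust fuel in the same loop shapes)
def pvHappyFuel : Nat := 1000000
def pvSearchFuel (n : Int) : Nat := (n.toNat + 1) * 1000000000

-- ===== PORT A =====
def numberLengthGo (x n : Int) : Int :=
  if 0 < x then numberLengthGo (PySem.Int.floordiv x 10) (n + 1) else n
termination_by x.toNat
decreasing_by
  have h1 : PySem.Int.floordiv x 10 = x / 10 := PySem.Int.floordiv_eq_ediv_of_pos (by norm_num)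
  omega

def numberLength (x : Int) : Int := numberLengthGo x 0

-- 10**counter: counter comes from range(xLength), hence 0 ≤ counter; 10 ^ counter.toNat is exact there
def sumOfSquaresOfDigits (x : Int) : Int :=
  let xLength := numberLength x
  (PySem.List.pyRange 0 xLength 1).foldl
    (fun s counter => s + (PySem.Int.mod (PySem.Int.floordiv x (10 ^ counter.toNat)) 10) ^ 2) 0

def isPrime (n : Int) : Bool :=
  if n < 2 then false
  else !((PySem.List.pyRange 2 n 1).any (fun factor => PySem.Int.mod n factor == 0))

def happyLoopA : Nat → Int → Bool
  | 0, _ => false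
  | f + 1, x =>
    let num := sumOfSquaresOfDigits x
    if num = 1 then true
    else if num = 4 then false
    else happyLoopA f num

def isHappyNumber (x : Int) : Bool :=
  if x < 1 then false else happyLoopA pvHappyFuel x

def searchA : Nat → Int → Int → Int → Int
  | 0, _, _, guess => guess
  | f + 1, n, found, guess =>
    if found ≤ n then
      let g := guess + 1
      if isPrime g && isHappyNumber g then searchA f n (found + 1) g else searchA f n found g
    else guess

def nthHappyPrime (n : Int) : Int := searchA (pvSearchFuel n) n 0 0

-- ===== PORT B =====
def isPrimeAltLoop (m i : Int) : Bool :=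
  if _h : i * i ≤ m then
    if PySem.Int.mod m i = 0 then false else isPrimeAltLoop m (i + 1)
  else true
termination_by (m + 1 - i).toNat
decreasing_by
  have hi : i ≤ m := by nlinarith [sq_nonneg i, sq_nonneg (i - 1)]
  omega

def isPrimeAlt (m : Int) : Bool := if m < 2 then false else isPrimeAltLoop m 2

def digitSquareSumGo (m s : Int) : Int :=
  if 0 < m then
    digitSquareSumGo (PySem.Int.floordiv m 10) (s + PySem.Int.mod m 10 * PySem.Int.mod m 10)
  else s
termination_by m.toNat
decreasing_by
  have h1 : PySem.Int.floordiv m 10 = m / 10 := PySem.Int.floordiv_eq_ediv_of_pos (by norm_num)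
  omega

def digitSquareSum (m : Int) : Int := digitSquareSumGo m 0

def happyLoopB : Nat → Int → Bool
  | 0, _ => false
  | f + 1, m =>
    let m' := digitSquareSum m
    if m' = 1 then true
    else if m' = 4 then false
    else happyLoopB f m'

def isHappyAlt (m : Int) : Bool :=
  if m < 1 then false else happyLoopB pvHappyFuel m

def searchB : Nat → Int → Int → Int
  | 0, _, guess => guess
  | f + 1, remaining, guess =>
    if 0 ≤ remaining then
      let g := guess + 1
      if isPrimeAlt g && isHappyAlt g then searchB f (remaining - 1) g else searchB f remaining g
    else guess

def nthHappyPrime_alt (n : Int) : Int := searchB (pvSearchFuel n) n 0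

-- ===== PRECONDITION & SPEC =====
def Spec_nthHappyPrime (n : Int) (out : Int) : Prop := out = nthHappyPrime_alt n
instance (n : Int) (out : Int) : Decidable (Spec_nthHappyPrime n out) := by
  unfold Spec_nthHappyPrime; infer_instance

-- ===== CLAIM (what is proved, stated in full; the proofs are below) =====
def Claim_equal_nthHappyPrime : Prop := ∀ (n : Int), Dom_nthHappyPrime n → Spec_nthHappyPrime n (nthHappyPrime n)

-- ===== LEMMAS AND PROOFS =====

theorem numberLengthGo_acc (x n : Int) : numberLengthGo x n = n + numberLengthGo x 0 := by
  by_cases hx : 0 < x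
  · rw [numberLengthGo, if_pos hx,
        numberLengthGo_acc (PySem.Int.floordiv x 10) (n + 1)]
    conv_rhs => rw [numberLengthGo, if_pos hx]
    rw [numberLengthGo_acc (PySem.Int.floordiv x 10) (0 + 1)]
    ring
  · rw [numberLengthGo, if_neg hx]
    conv_rhs => rw [numberLengthGo, if_neg hx]
    ring
termination_by x.toNat
decreasing_by
  all_goals
    have h1 : PySem.Int.floordiv x 10 = x / 10 := PySem.Int.floordiv_eq_ediv_of_pos (by norm_num)
    omega

theorem numberLengthGo_nonneg (x : Int) : 0 ≤ numberLengthGo x 0 := by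
  by_cases hx : 0 < x
  · rw [numberLengthGo, if_pos hx, numberLengthGo_acc]
    have := numberLengthGo_nonneg (PySem.Int.floordiv x 10)
    omega
  · rw [numberLengthGo, if_neg hx]
termination_by x.toNat
decreasing_by
  have h1 : PySem.Int.floordiv x 10 = x / 10 := PySem.Int.floordiv_eq_ediv_of_pos (by norm_num)
  omega

theorem digitSquareSumGo_acc (m s : Int) : digitSquareSumGo m s = s + digitSquareSumGo m 0 := by
  by_cases hm : 0 < m
  · rw [digitSquareSumGo, if_pos hm,
        digitSquareSumGo_acc (PySem.Int.floordiv m 10) (s + PySem.Int.mod m 10 * PySem.Int.mod m 10)]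
    conv_rhs => rw [digitSquareSumGo, if_pos hm]
    rw [digitSquareSumGo_acc (PySem.Int.floordiv m 10) (0 + PySem.Int.mod m 10 * PySem.Int.mod m 10)]
    ring
  · rw [digitSquareSumGo, if_neg hm]
    conv_rhs => rw [digitSquareSumGo, if_neg hm]
    ring
termination_by m.toNat
decreasing_by
  all_goals
    have h1 : PySem.Int.floordiv m 10 = m / 10 := PySem.Int.floordiv_eq_ediv_of_pos (by norm_num)
    omega

theorem sumOfSquaresOfDigits_eq (x : Int) : sumOfSquaresOfDigits x = digitSquareSum x := by
  by_cases hx : 0 < x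
  · have hL : numberLength x = numberLengthGo (PySem.Int.floordiv x 10) 0 + 1 := by
      rw [numberLength, numberLengthGo, if_pos hx, numberLengthGo_acc]; ring
    have hL0 : 0 ≤ numberLengthGo (PySem.Int.floordiv x 10) 0 := numberLengthGo_nonneg _
    have hIH : sumOfSquaresOfDigits (PySem.Int.floordiv x 10)
        = digitSquareSum (PySem.Int.floordiv x 10) := sumOfSquaresOfDigits_eq _
    rw [sumOfSquaresOfDigits, hL]
    rw [PySem.List.pyRange_one_cons (by omega)]
    simp only [List.foldl_cons]
    have hhead : (0:Int) + (PySem.Int.mod (PySem.Int.floordiv x (10 ^ (0:Int).toNat)) 10) ^ 2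
        = PySem.Int.mod x 10 * PySem.Int.mod x 10 := by
      norm_num [PySem.Int.floordiv_eq_ediv_of_pos]
      ring
    rw [hhead]
    rw [digitSquareSum, digitSquareSumGo, if_pos hx, digitSquareSumGo_acc]
    rw [PySem.List.foldl_add]
    rw [show digitSquareSumGo (PySem.Int.floordiv x 10) 0
          = digitSquareSum (PySem.Int.floordiv x 10) from rfl, ← hIH, sumOfSquaresOfDigits]
    have hL' : numberLength (PySem.Int.floordiv x 10) = numberLengthGo (PySem.Int.floordiv x 10) 0 := rfl
    rw [hL', PySem.List.foldl_add]
    have hmaps : (PySem.List.pyRange (0+1) (numberLengthGo (PySem.Int.floordiv x 10) 0 + 1) 1).map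
          (fun counter => (PySem.Int.mod (PySem.Int.floordiv x (10 ^ counter.toNat)) 10) ^ 2)
        = (PySem.List.pyRange 0 (numberLengthGo (PySem.Int.floordiv x 10) 0) 1).map
          (fun counter => (PySem.Int.mod (PySem.Int.floordiv (PySem.Int.floordiv x 10) (10 ^ counter.toNat)) 10) ^ 2) := by
      rw [PySem.List.pyRange_one, PySem.List.pyRange_one]
      have hlen : (numberLengthGo (PySem.Int.floordiv x 10) 0 + 1 - (0+1)).toNat
          = (numberLengthGo (PySem.Int.floordiv x 10) 0 - 0).toNat := by omega
      rw [hlen]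
      simp only [List.map_map]
      apply List.map_congr_left
      intro k _
      simp only [Function.comp]
      have h1 : ((0:Int) + 1 + (k:Int)).toNat = k + 1 := by omega
      have h2 : ((0:Int) + (k:Int)).toNat = k := by omega
      rw [h1, h2]
      have hdiv : PySem.Int.floordiv x (10 ^ (k+1))
          = PySem.Int.floordiv (PySem.Int.floordiv x 10) (10 ^ k) := by
        rw [PySem.Int.floordiv_eq_ediv_of_pos (b := (10:Int)^(k+1)) (by positivity),
            PySem.Int.floordiv_eq_ediv_of_pos (b := (10:Int)) (by norm_num),
            PySem.Int.floordiv_eq_ediv_of_pos (b := (10:Int)^k) (by positivity),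
            Int.ediv_ediv_of_nonneg (z := (10:Int)^k) (by norm_num : (0:Int) ≤ 10)]
        ring_nf
      rw [hdiv]
    rw [hmaps]
    ring
  · have hL : numberLength x = 0 := by rw [numberLength, numberLengthGo, if_neg hx]
    rw [sumOfSquaresOfDigits, hL]
    rw [digitSquareSum, digitSquareSumGo, if_neg hx]
    simp [PySem.List.pyRange_one_eq_nil]
termination_by x.toNat
decreasing_by
  all_goals
    have h1 : PySem.Int.floordiv x 10 = x / 10 := PySem.Int.floordiv_eq_ediv_of_pos (by norm_num)
    omega

theorem isPrimeAltLoop_iff (m i : Int) (hi : 2 ≤ i) :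
    isPrimeAltLoop m i = true ↔ ∀ f, i ≤ f → f * f ≤ m → ¬ f ∣ m := by
  by_cases h : i * i ≤ m
  · by_cases hd : PySem.Int.mod m i = 0
    · rw [isPrimeAltLoop, dif_pos h, if_pos hd]
      simp only [Bool.false_eq_true, false_iff]
      push Not
      exact ⟨i, le_refl i, h, by rwa [PySem.Int.mod_eq_zero_iff_dvd] at hd⟩
    · rw [isPrimeAltLoop, dif_pos h, if_neg hd]
      rw [isPrimeAltLoop_iff m (i + 1) (by omega)]
      constructor
      · intro hall f hf hff
        rcases eq_or_lt_of_le hf with rfl | hlt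
        · rw [← PySem.Int.mod_eq_zero_iff_dvd]; exact hd
        · exact hall f (by omega) hff
      · intro hall f hf hff
        exact hall f (by omega) hff
  · rw [isPrimeAltLoop, dif_neg h]
    simp only [true_iff]
    intro f hf hff
    exfalso
    have : i * i ≤ f * f := by nlinarith
    omega
termination_by (m + 1 - i).toNat
decreasing_by
  have hile : i ≤ m := by nlinarith [sq_nonneg i, sq_nonneg (i - 1)]
  omega

theorem isPrime_eq (m : Int) : isPrime m = isPrimeAlt m := by
  by_cases hm : m < 2
  · rw [isPrime, if_pos hm, isPrimeAlt, if_pos hm]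
  · rw [isPrime, if_neg hm, isPrimeAlt, if_neg hm]
    rw [Bool.eq_iff_iff, Bool.not_eq_eq_eq_not, Bool.not_true, List.any_eq_false]
    rw [isPrimeAltLoop_iff m 2 (le_refl 2)]
    constructor
    · intro hall f hf hff hdvd
      have hfm : f < m := by nlinarith
      have := hall f (by rw [PySem.List.mem_pyRange_one]; omega)
      rw [beq_iff_eq, PySem.Int.mod_eq_zero_iff_dvd] at this
      exact this hdvd
    · intro hall f hmem
      rw [PySem.List.mem_pyRange_one] at hmem
      rw [beq_iff_eq, PySem.Int.mod_eq_zero_iff_dvd]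
      intro hdvd
      by_cases hff : f * f ≤ m
      · exact hall f hmem.1 hff hdvd
      · obtain ⟨e, he⟩ := hdvd
        have hf0 : 0 < f := by omega
        have hm0 : 0 < m := by omega
        have he0 : 0 < e := by nlinarith
        have he2 : 2 ≤ e := by
          rcases (by omega : e = 1 ∨ 2 ≤ e) with rfl | h2
          · omega
          · exact h2
        have hef : e < f := by nlinarith
        have hee : e * e ≤ m := by nlinarith
        exact hall e he2 hee ⟨f, by rw [he]; ring⟩

theorem happyLoop_eq (f : Nat) (x : Int) : happyLoopA f x = happyLoopB f x := by
  induction f generalizing x with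
  | zero => rfl
  | succ f ih =>
    rw [happyLoopA, happyLoopB]
    simp only [sumOfSquaresOfDigits_eq, ih]

theorem isHappy_eq (x : Int) : isHappyNumber x = isHappyAlt x := by
  rw [isHappyNumber, isHappyAlt, happyLoop_eq]

theorem search_eq (f : Nat) (n found guess : Int) :
    searchA f n found guess = searchB f (n - found) guess := by
  induction f generalizing found guess with
  | zero => rfl
  | succ f ih =>
    rw [searchA, searchB]
    by_cases h : found ≤ n
    · rw [if_pos h, if_pos (by omega : (0:Int) ≤ n - found)]
      simp only [isPrime_eq, isHappy_eq]
      by_cases hp : isPrimeAlt (guess + 1) && isHappyAlt (guess + 1)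
      · rw [if_pos hp, if_pos hp, ih, show n - (found + 1) = n - found - 1 by ring]
      · rw [if_neg hp, if_neg hp, ih]
    · rw [if_neg h, if_neg (by omega : ¬ (0:Int) ≤ n - found)]

-- ===== VERDICT (by name: the statement is the Claim_ definition above) =====
theorem nthHappyPrime_spec : Claim_equal_nthHappyPrime := by
  intro n _
  unfold Spec_nthHappyPrime
  rw [nthHappyPrime, nthHappyPrime_alt, search_eq, sub_zero]
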